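-- pv_equiv track=rewrite | github.com/S1ngularD2ality/eidonic-language-elol | eidonic_language_of_light/00-100_core_glyph_architecture/glyph_067.py | glyph_067
-- ===== SOURCE A (Python) =====
-- from typing import Mapping, Hashable, List, Tuple
--
-- def glyph_067(redirects: Mapping[Hashable, Hashable]) -> List[Tuple[Hashable, Hashable]]:
--     """
--     Mirror Trail Redirector — resolve redirect chains to canonical mirrors.
--
--     Overview
--     --------
--     For mapping R(u)=v, follows chains u→…→root and returns (u, root). Simple cycles
--     are broken by picking the smallest string representation.
--
--     Parameters
--     ----------
--     redirects : Mapping[Hashable, Hashable]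
--         Redirect graph.
--
--     Returns
--     -------
--     List[Tuple[Hashable, Hashable]]
--         List of (source, root) pairs.
--
--     Examples
--     --------
--     >>> glyph_067({"a":"b","b":"c"})
--     [('a','c'),('b','c')]
--
--     Exceptions
--     ----------
--     (none)
--
--     Complexity
--     ----------
--     - Time  : O(E) average
--     - Space : O(V)
--     """
--     def root(u):
--         seen = []
--         while u in redirects and u not in seen:
--             seen.append(u)
--             u = redirects[u]
--         if u in seen:
--             u = min(map(str, seen))
--         return u
--     return [(k, root(k)) for k in redirects.keys()]
-- ===== SOURCE B (Python) =====
-- def glyph_067(redirects):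
--     """Mirror Trail Redirector — bounded-iteration re-implementation.
--
--     Walks each chain at most len(redirects) steps instead of keeping a 'seen'
--     list: after that many steps the walk is still on a key iff the chain is
--     cyclic, and the minimum string over the bounded trajectory equals the
--     minimum over the distinct nodes visited.
--     """
--     n = len(redirects)
--     out = []
--     for k in redirects:
--         u = k
--         traj = [u]
--         for _ in range(n):
--             if u not in redirects:
--                 break
--             u = redirects[u]
--             traj.append(u)
--         if u in redirects:
--             out.append((k, min(map(str, traj))))
--         else:
--             out.append((k, u))
--     return out
-- ===== Notes on version B (the rewrite author's own statement) =====
-- stated objective: alternative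
-- what changed: A follows each chain while scanning a growing seen-list to detect repeats (quadratic per chain); B has no membership scans at all: it walks each chain at most len(redirects) steps - after that many steps the walk is still on a key exactly when the chain is cyclic - and takes min over the bounded trajectory, which equals min over A's distinct seen nodes.
import Mathlib
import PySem

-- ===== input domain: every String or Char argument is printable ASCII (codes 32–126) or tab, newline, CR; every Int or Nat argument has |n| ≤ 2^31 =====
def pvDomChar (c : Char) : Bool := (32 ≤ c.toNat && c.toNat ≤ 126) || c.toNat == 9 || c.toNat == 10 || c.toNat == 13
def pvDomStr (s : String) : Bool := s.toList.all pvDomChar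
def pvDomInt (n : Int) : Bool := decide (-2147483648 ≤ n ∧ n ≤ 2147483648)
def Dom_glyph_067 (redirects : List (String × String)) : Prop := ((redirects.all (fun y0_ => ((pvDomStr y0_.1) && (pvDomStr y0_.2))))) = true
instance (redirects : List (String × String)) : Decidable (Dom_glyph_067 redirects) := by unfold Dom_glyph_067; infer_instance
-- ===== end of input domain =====

-- B replaces A's seen-list walk (repeat detection by membership scan per step) by a walk
-- bounded by len(redirects) steps: after that many steps the walk is still on a key iff the
-- chain is cyclic, and min over the bounded trajectory equals min over A's seen list.
-- Objective: alternative (no membership scans; not measurably faster on the timed inputs).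


-- ===== PORT A =====

-- the next two lemmas are cited by the termination proof of glyph_067_root
-- (appending a fresh key to `seen` strictly shrinks the set of unseen keys)
theorem pvFilterMonoLen {α : Type} (l : List α) (p q : α → Bool)
    (h : ∀ a, p a = true → q a = true) :
    (l.filter p).length ≤ (l.filter q).length := by
  induction l with
  | nil => simp
  | cons a t ih =>
    by_cases hp : p a = true
    · simp [hp, h a hp]; omega
    · by_cases hq : q a = true
      · simp [hp, hq]; omega
      · simp [hp, hq]; omega

theorem pvFilterLt {seen : List String} {u : String} (l : List String)
    (hu : u ∈ l) (hus : u ∉ seen) :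
    (l.filter (fun k => decide (k ∉ seen ++ [u]))).length
      < (l.filter (fun k => decide (k ∉ seen))).length := by
  induction l with
  | nil => cases hu
  | cons a t ih =>
    by_cases ha : a = u
    · subst ha
      have hnew : (decide (a ∉ seen ++ [a])) = false := by simp
      have hold : (decide (a ∉ seen)) = true := by simp [hus]
      rw [List.filter_cons, List.filter_cons, hnew, hold]
      have := pvFilterMonoLen t (fun k => decide (k ∉ seen ++ [a])) (fun k => decide (k ∉ seen))
        (by intro b hb
            simp only [decide_eq_true_eq, List.mem_append, List.mem_singleton] at hb ⊢
            exact fun hc => hb (Or.inl hc))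
      simpa using Nat.lt_succ_of_le this
    · have hmem : u ∈ t := by
        cases hu with
        | head => exact absurd rfl ha
        | tail _ h => exact h
      have heq : (decide (a ∉ seen ++ [u])) = (decide (a ∉ seen)) := by
        by_cases hs : a ∈ seen <;> simp [hs, ha]
      rw [List.filter_cons, List.filter_cons, heq]
      cases hb : (decide (a ∉ seen)) with
      | false => simpa using ih hmem
      | true => simpa using ih hmem

-- a key looked up successfully is among the redirect keys (also cited by the proofs)
theorem pvGet?_ne_none_iff (R : List (String × String)) (u : String) :
    ((PySem.Dict.mk R).get? u ≠ none) ↔ u ∈ R.map Prod.fst := by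
  induction R with
  | nil => simp [PySem.Dict.get?]
  | cons p t ih =>
    rw [show p = (p.1, p.2) from rfl]
    rw [PySem.Dict.get?_mk_cons]
    by_cases h : p.1 = u
    · subst h; simp
    · simp only [beq_iff_eq, h, if_false, List.map_cons, List.mem_cons]
      rw [ih]
      constructor
      · exact fun hm => Or.inr hm
      · rintro (hm | hm)
        · exact absurd hm.symm h
        · exact hm

-- the while-loop of A's inner `root`: walk until a non-key or a repeat
def glyph_067_root (R : List (String × String)) (seen : List String) (u : String) :
    List String × String :=
  match hg : (PySem.Dict.mk R).get? u with
  | some v =>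
    if hs : u ∈ seen then (seen, u)
    else glyph_067_root R (seen ++ [u]) v
  | none => (seen, u)
termination_by ((R.map Prod.fst).filter (fun k => decide (k ∉ seen))).length
decreasing_by
  exact pvFilterLt (R.map Prod.fst)
    ((pvGet?_ne_none_iff R u).mp (by simp [hg])) hs

def glyph_067 (redirects : List (String × String)) : List (String × String) :=
  (PySem.Dict.mk redirects).keys.map (fun k =>
    match glyph_067_root redirects [] k with
    | (seen, u) =>
      if u ∈ seen then
        -- u = min(map(str, seen)); str is the identity on strings, and seen ≠ [] here
        (k, match PySem.List.min? seen (fun x => x) with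
            | some m => m
            | none => u)
      else (k, u))

-- ===== PORT B =====

-- B's bounded walk: up to `fuel` redirect steps, recording the trajectory
def glyph_067_walk (R : List (String × String)) (u : String) (traj : List String) :
    Nat → List String × String
  | 0 => (traj, u)
  | fuel + 1 =>
    match (PySem.Dict.mk R).get? u with
    | none => (traj, u)
    | some v => glyph_067_walk R v (traj ++ [v]) fuel

def glyph_067_alt (redirects : List (String × String)) : List (String × String) :=
  (PySem.Dict.mk redirects).keys.map (fun k =>
    match glyph_067_walk redirects k [k] redirects.length with
    | (traj, u) =>
      if (PySem.Dict.mk redirects).contains u then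
        -- min(map(str, traj)); str is the identity on strings, and traj ≠ []
        (k, match PySem.List.min? traj (fun x => x) with
            | some m => m
            | none => u)
      else (k, u))

-- ===== PRECONDITION & SPEC =====
def Spec_glyph_067 (redirects : List (String × String)) (out : List (String × String)) : Prop := out = glyph_067_alt redirects
instance (redirects : List (String × String)) (out : List (String × String)) : Decidable (Spec_glyph_067 redirects out) := by unfold Spec_glyph_067; infer_instance

-- ===== CLAIM (what is proved, stated in full; the proofs are below) =====
def Claim_equal_glyph_067 : Prop := ∀ (redirects : List (String × String)), Dom_glyph_067 redirects → Spec_glyph_067 redirects (glyph_067 redirects)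

-- ===== LEMMAS AND PROOFS =====

-- the one-step function underlying both walks (identity off the keys)
def pvStep (R : List (String × String)) (u : String) : String :=
  ((PySem.Dict.mk R).get? u).getD u

-- shifting an orbit prefix by one step (A-side list algebra)
theorem pvShiftList (R : List (String × String)) (u v : String) (seen : List String)
    (hv : pvStep R u = v) (m : Nat) :
    seen ++ (List.range (m + 1)).map (fun i => (pvStep R)^[i] u) =
      (seen ++ [u]) ++ (List.range m).map (fun i => (pvStep R)^[i] v) := by
  rw [List.range_succ_eq_map, List.map_cons, List.map_map]
  have h : ((fun i => (pvStep R)^[i] u) ∘ (· + 1)) = fun i => (pvStep R)^[i] v := by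
    funext i
    simp [Function.comp, Function.iterate_succ_apply, hv]
  rw [h]
  simp

-- shifting a trajectory by one step (B-side list algebra)
theorem pvShiftTraj (R : List (String × String)) (u v : String) (traj : List String)
    (hv : pvStep R u = v) (f : Nat) :
    (traj ++ [v]) ++ (List.range f).map (fun i => (pvStep R)^[i + 1] v) =
      traj ++ (List.range (f + 1)).map (fun i => (pvStep R)^[i + 1] u) := by
  rw [List.range_succ_eq_map, List.map_cons, List.map_map]
  have h : ((fun i => (pvStep R)^[i + 1] u) ∘ (· + 1)) = fun i => (pvStep R)^[i + 1] v := by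
    funext i
    show (pvStep R)^[i + 1 + 1] u = (pvStep R)^[i + 1] v
    rw [Function.iterate_succ_apply (pvStep R) (i + 1) u, hv]
  rw [h]
  simp [hv]

-- characterization of A's loop: it returns an orbit prefix of fresh keys,
-- stopping at a non-key or at a repeat
theorem pvRootChar (R : List (String × String)) (seen : List String) (u : String) :
    ∃ m : Nat,
      glyph_067_root R seen u =
        (seen ++ (List.range m).map (fun i => (pvStep R)^[i] u), (pvStep R)^[m] u) ∧
      (∀ i < m, (PySem.Dict.mk R).get? ((pvStep R)^[i] u) ≠ none ∧
          (pvStep R)^[i] u ∉ seen ++ (List.range i).map (fun j => (pvStep R)^[j] u)) ∧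
      ((PySem.Dict.mk R).get? ((pvStep R)^[m] u) = none ∨
          (pvStep R)^[m] u ∈ seen ++ (List.range m).map (fun i => (pvStep R)^[i] u)) := by
  fun_induction glyph_067_root R seen u with
  | case1 seen u v hg h =>
    exact ⟨0, by simp, fun i hi => absurd hi (by omega), Or.inr (by simpa using h)⟩
  | case2 seen u v hg h ih =>
    obtain ⟨m, h1, h2, h3⟩ := ih
    have hv : pvStep R u = v := by simp [pvStep, hg]
    have hsh : ∀ i, (pvStep R)^[i] v = (pvStep R)^[i + 1] u := fun i => by
      rw [Function.iterate_succ_apply, hv]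
    refine ⟨m + 1, ?_, ?_, ?_⟩
    · rw [h1, pvShiftList R u v seen hv m, hsh m]
    · intro i hi
      cases i with
      | zero =>
        refine ⟨by simp [hg], ?_⟩
        simpa using h
      | succ i =>
        have hi' : i < m := by omega
        obtain ⟨hk, hn⟩ := h2 i hi'
        constructor
        · rw [← hsh i]; exact hk
        · rw [← hsh i, pvShiftList R u v seen hv i]; exact hn
    · rcases h3 with h3 | h3
      · left; rw [← hsh m]; exact h3
      · right; rw [← hsh m, pvShiftList R u v seen hv m]; exact h3
  | case3 seen u hg =>
    exact ⟨0, by simp, fun i hi => absurd hi (by omega), Or.inl (by simpa using hg)⟩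

-- B's walk when every chain node is a key: all `fuel` steps happen
theorem pvWalkGo (R : List (String × String)) :
    ∀ (fuel : Nat) (u : String) (traj : List String),
      (∀ i < fuel, (PySem.Dict.mk R).get? ((pvStep R)^[i] u) ≠ none) →
      glyph_067_walk R u traj fuel =
        (traj ++ (List.range fuel).map (fun i => (pvStep R)^[i + 1] u), (pvStep R)^[fuel] u) := by
  intro fuel
  induction fuel with
  | zero => intro u traj _; simp [glyph_067_walk]
  | succ f ih =>
    intro u traj h
    have h0 := h 0 (by omega)
    simp only [Function.iterate_zero, id_eq] at h0
    cases hv : (PySem.Dict.mk R).get? u with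
    | none => exact absurd hv h0
    | some v =>
      have hveq : pvStep R u = v := by simp [pvStep, hv]
      have hsh : ∀ i, (pvStep R)^[i] v = (pvStep R)^[i + 1] u := fun i => by
        rw [Function.iterate_succ_apply, hveq]
      simp only [glyph_067_walk, hv]
      rw [ih v (traj ++ [v]) (fun i hi => by rw [hsh i]; exact h (i + 1) (by omega))]
      rw [pvShiftTraj R u v traj hveq f, hsh f]

-- B's walk when the chain reaches a non-key within `fuel` steps
theorem pvWalkStop (R : List (String × String)) (s : Nat) :
    ∀ (u : String) (traj : List String) (fuel : Nat), s ≤ fuel →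
      (∀ i < s, (PySem.Dict.mk R).get? ((pvStep R)^[i] u) ≠ none) →
      (PySem.Dict.mk R).get? ((pvStep R)^[s] u) = none →
      glyph_067_walk R u traj fuel =
        (traj ++ (List.range s).map (fun i => (pvStep R)^[i + 1] u), (pvStep R)^[s] u) := by
  induction s with
  | zero =>
    intro u traj fuel _ _ hstop
    simp only [Function.iterate_zero, id_eq] at hstop
    cases fuel with
    | zero => simp [glyph_067_walk]
    | succ f => simp [glyph_067_walk, hstop]
  | succ s ih =>
    intro u traj fuel hle hkeys hstop
    cases fuel with
    | zero => omega
    | succ f =>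
      have h0 := hkeys 0 (by omega)
      simp only [Function.iterate_zero, id_eq] at h0
      cases hv : (PySem.Dict.mk R).get? u with
      | none => exact absurd hv h0
      | some v =>
        have hveq : pvStep R u = v := by simp [pvStep, hv]
        have hsh : ∀ i, (pvStep R)^[i] v = (pvStep R)^[i + 1] u := fun i => by
          rw [Function.iterate_succ_apply, hveq]
        simp only [glyph_067_walk, hv]
        rw [ih v (traj ++ [v]) f (by omega)
          (fun i hi => by rw [hsh i]; exact hkeys (i + 1) (by omega))
          (by rw [hsh s]; exact hstop)]
        rw [pvShiftTraj R u v traj hveq s, hsh s]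

-- Python's min over two nonempty lists with the same elements is the same value
theorem pvMinCongr (xs ys : List String) (hxs : xs ≠ []) (hys : ys ≠ [])
    (h : ∀ x, x ∈ xs ↔ x ∈ ys) :
    PySem.List.min? xs (fun x => x) = PySem.List.min? ys (fun x => x) := by
  obtain ⟨m1, hm1⟩ : ∃ m1, PySem.List.min? xs (fun x => x) = some m1 := by
    cases hx : PySem.List.min? xs (fun x => x) with
    | none => exact absurd ((PySem.List.min?_eq_none_iff xs _).mp hx) hxs
    | some m => exact ⟨m, rfl⟩
  obtain ⟨m2, hm2⟩ : ∃ m2, PySem.List.min? ys (fun x => x) = some m2 := by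
    cases hy : PySem.List.min? ys (fun x => x) with
    | none => exact absurd ((PySem.List.min?_eq_none_iff ys _).mp hy) hys
    | some m => exact ⟨m, rfl⟩
  rw [hm1, hm2]
  have e1 := PySem.List.min?_mem hm1
  have e2 := PySem.List.min?_mem hm2
  have l1 := PySem.List.min?_isMin hm1
  have l2 := PySem.List.min?_isMin hm2
  exact congrArg some (le_antisymm (l1 m2 ((h m2).mpr e2)) (l2 m1 ((h m1).mp e1)))

-- once the orbit repeats, every iterate equals an iterate below the repeat point
theorem pvCycle (R : List (String × String)) (k : String) (m j : Nat) (hj : j < m)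
    (hcyc : (pvStep R)^[m] k = (pvStep R)^[j] k) :
    ∀ i, ∃ i', i' < m ∧ (pvStep R)^[i] k = (pvStep R)^[i'] k := by
  intro i
  induction i with
  | zero => exact ⟨0, by omega, rfl⟩
  | succ i ih =>
    obtain ⟨i', hi', he⟩ := ih
    have hstep : (pvStep R)^[i + 1] k = (pvStep R)^[i' + 1] k := by
      simp only [Function.iterate_succ_apply']
      rw [he]
    by_cases h : i' + 1 < m
    · exact ⟨i' + 1, h, hstep⟩
    · have hm : i' + 1 = m := by omega
      exact ⟨j, hj, by rw [hstep, hm, hcyc]⟩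

-- a list whose entries avoid the prior prefix has no duplicates
theorem pvNodupOfFresh (g : Nat → String) (m : Nat)
    (h : ∀ i < m, g i ∉ (List.range i).map g) : ((List.range m).map g).Nodup := by
  induction m with
  | zero => simp
  | succ m ih =>
    rw [List.range_succ, List.map_append]
    refine List.Nodup.append (ih (fun i hi => h i (by omega))) (by simp) ?_
    intro a ha hb
    simp only [List.map_cons, List.map_nil, List.mem_cons, List.not_mem_nil, or_false] at hb
    exact h m (by omega) (hb ▸ ha)

-- a duplicate-free list of keys is no longer than the redirect list
theorem pvNodupSubsetLen {l l' : List String} (h : l.Nodup) (hs : ∀ x ∈ l, x ∈ l') :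
    l.length ≤ l'.length := by
  calc l.length = l.toFinset.card := (List.toFinset_card_of_nodup h).symm
    _ ≤ l'.toFinset.card := Finset.card_le_card (by
        intro x hx
        rw [List.mem_toFinset] at hx ⊢
        exact hs x hx)
    _ ≤ l'.length := l'.toFinset_card_le

-- the per-key agreement of the two ports
theorem pvPointwise (R : List (String × String)) (k : String) :
    (match glyph_067_root R [] k with
     | (seen, u) =>
       if u ∈ seen then
         (k, match PySem.List.min? seen (fun x => x) with
             | some m => m
             | none => u)
       else (k, u)) =
    (match glyph_067_walk R k [k] R.length with
     | (traj, u) =>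
       if (PySem.Dict.mk R).contains u then
         (k, match PySem.List.min? traj (fun x => x) with
             | some m => m
             | none => u)
       else (k, u)) := by
  obtain ⟨m, hroot, hfresh, hstop⟩ := pvRootChar R [] k
  simp only [List.nil_append] at hroot hfresh hstop
  have hnd := pvNodupOfFresh (fun i => (pvStep R)^[i] k) m (fun i hi => (hfresh i hi).2)
  have hmlen : m ≤ R.length := by
    have hsub : ∀ x ∈ (List.range m).map (fun i => (pvStep R)^[i] k), x ∈ R.map Prod.fst := by
      intro x hx
      simp only [List.mem_map, List.mem_range] at hx
      obtain ⟨i, hi, hxe⟩ := hx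
      rw [← hxe]
      exact (pvGet?_ne_none_iff R _).mp (hfresh i hi).1
    have := pvNodupSubsetLen hnd hsub
    simpa using this
  rw [hroot]
  dsimp only
  by_cases hcyc : (pvStep R)^[m] k ∈ (List.range m).map (fun i => (pvStep R)^[i] k)
  · obtain ⟨j, hj, hje⟩ : ∃ j, j < m ∧ (pvStep R)^[m] k = (pvStep R)^[j] k := by
      simp only [List.mem_map, List.mem_range] at hcyc
      obtain ⟨j, hj, he⟩ := hcyc
      exact ⟨j, hj, he.symm⟩
    have hall := pvCycle R k m j hj hje
    have hkey : ∀ i, (PySem.Dict.mk R).get? ((pvStep R)^[i] k) ≠ none := by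
      intro i
      obtain ⟨i', hi', he⟩ := hall i
      rw [he]
      exact (hfresh i' hi').1
    rw [if_pos hcyc, pvWalkGo R R.length k [k] (fun i _ => hkey i)]
    dsimp only
    have htraj : [k] ++ (List.range R.length).map (fun i => (pvStep R)^[i + 1] k)
        = (List.range (R.length + 1)).map (fun i => (pvStep R)^[i] k) := by
      rw [List.range_succ_eq_map, List.map_cons, List.map_map]
      rfl
    have hcont : (PySem.Dict.mk R).contains ((pvStep R)^[R.length] k) = true := by
      rw [PySem.Dict.contains_eq_isSome_get?]
      cases hgg : (PySem.Dict.mk R).get? ((pvStep R)^[R.length] k) with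
      | none => exact absurd hgg (hkey R.length)
      | some v => rfl
    rw [hcont, if_pos rfl]
    have hmem : ∀ x, x ∈ (List.range m).map (fun i => (pvStep R)^[i] k) ↔
        x ∈ [k] ++ (List.range R.length).map (fun i => (pvStep R)^[i + 1] k) := by
      intro x
      rw [htraj]
      simp only [List.mem_map, List.mem_range]
      constructor
      · rintro ⟨i, hi, he⟩; exact ⟨i, by omega, he⟩
      · rintro ⟨i, hi, he⟩
        obtain ⟨i', hi', he'⟩ := hall i
        exact ⟨i', hi', by rw [← he', he]⟩
    have hne1 : (List.range m).map (fun i => (pvStep R)^[i] k) ≠ [] := by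
      intro h0
      rw [h0] at hcyc
      cases hcyc
    have hne2 : [k] ++ (List.range R.length).map (fun i => (pvStep R)^[i + 1] k) ≠ [] := by simp
    rw [pvMinCongr _ _ hne1 hne2 hmem]
    cases hmn : PySem.List.min? ([k] ++ (List.range R.length).map (fun i => (pvStep R)^[i + 1] k)) (fun x => x) with
    | none => exact absurd ((PySem.List.min?_eq_none_iff _ _).mp hmn) hne2
    | some mv => rfl
  · have hstopn : (PySem.Dict.mk R).get? ((pvStep R)^[m] k) = none := by
      rcases hstop with h | h
      · exact h
      · exact absurd h hcyc
    rw [if_neg hcyc,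
      pvWalkStop R m k [k] R.length hmlen (fun i hi => (hfresh i hi).1) hstopn]
    dsimp only
    have hcont : (PySem.Dict.mk R).contains ((pvStep R)^[m] k) = false := by
      rw [PySem.Dict.contains_eq_isSome_get?, hstopn]
      rfl
    rw [hcont]
    simp

-- ===== VERDICT (by name: the statement is the Claim_ definition above) =====
theorem glyph_067_spec : Claim_equal_glyph_067 := by
  intro R _
  unfold Spec_glyph_067 glyph_067 glyph_067_alt
  exact List.map_congr_left (fun k _ => pvPointwise R k)
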